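-- pv_equiv track=rewrite | github.com/plhosk/wordtracer | scripts/analyze_levels_bundle.py | summarize_gaps
-- ===== SOURCE A (Python) =====
-- def level_code_sort_key(code: str) -> tuple[str, int, str]:
--     group = ""
--     index = 0
--     while index < len(code) and code[index].isalpha():
--         group += code[index]
--         index += 1
--     suffix = code[index:]
--     if suffix.isdigit():
--         return group, int(suffix), code
--     return group, 1_000_000_000, code
--
-- def summarize_gaps(
--     level_ids_by_word: dict[str, list[str]],
-- ) -> tuple[int, dict[int, int]]:
--     gaps: list[int] = []
--     for ids in level_ids_by_word.values():
--         ordered_ids = sorted(ids, key=level_code_sort_key)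
--         for idx in range(1, len(ordered_ids)):
--             prev_code = level_code_sort_key(ordered_ids[idx - 1])
--             curr_code = level_code_sort_key(ordered_ids[idx])
--             gap = curr_code[1] - prev_code[1]
--             gaps.append(gap)
--
--     thresholds = (12, 16, 20)
--     below = {threshold: 0 for threshold in thresholds}
--     for gap in gaps:
--         for threshold in thresholds:
--             if gap < threshold:
--                 below[threshold] += 1
--
--     return len(gaps), below
-- ===== SOURCE B (Python) =====
-- BIG = 1_000_000_000
--
--
-- def _parse(code):
--     i = 0
--     while i < len(code) and code[i].isalpha():
--         i += 1
--     suffix = code[i:]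
--     return code[:i], int(suffix) if suffix.isdigit() else BIG
--
--
-- def summarize_gaps(level_ids_by_word):
--     gaps = []
--     for ids in level_ids_by_word.values():
--         # bucket numeric parts by alpha prefix; no tuple-key sort needed,
--         # since gaps only read the numeric component
--         buckets = {}
--         for code in ids:
--             group, num = _parse(code)
--             buckets.setdefault(group, []).append(num)
--         nums = []
--         for group in sorted(buckets):
--             nums.extend(sorted(buckets[group]))
--         for prev, curr in zip(nums, nums[1:]):
--             gaps.append(curr - prev)
--     below = {t: sum(1 for g in gaps if g < t) for t in (12, 16, 20)}
--     return len(gaps), below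
-- ===== Notes on version B (the rewrite author's own statement) =====
-- stated objective: faster
-- what changed: B abandons A's comparison sort of (prefix, number, code) key triples: it buckets each word's numeric parts in a dict keyed by the alpha prefix, sorts the group names and each group's plain integer list separately, and reads the gaps off the flattened number sequence (correct because gaps only use the numeric key component); the histogram is three counting passes over the gaps instead of a per-gap dict-update loop.
import Mathlib
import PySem

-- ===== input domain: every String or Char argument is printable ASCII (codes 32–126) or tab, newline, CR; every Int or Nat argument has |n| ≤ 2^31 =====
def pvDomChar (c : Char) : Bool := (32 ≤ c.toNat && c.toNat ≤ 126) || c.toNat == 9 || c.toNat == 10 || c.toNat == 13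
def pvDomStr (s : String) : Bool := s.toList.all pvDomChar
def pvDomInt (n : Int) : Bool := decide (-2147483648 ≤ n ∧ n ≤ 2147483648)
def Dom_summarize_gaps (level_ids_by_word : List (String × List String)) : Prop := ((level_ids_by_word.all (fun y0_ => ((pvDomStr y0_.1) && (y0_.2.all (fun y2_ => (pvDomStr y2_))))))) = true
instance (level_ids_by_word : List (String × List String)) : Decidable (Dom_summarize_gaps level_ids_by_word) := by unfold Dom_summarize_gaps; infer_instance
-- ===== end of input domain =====

-- B replaces A's comparison sort of (prefix, number, code) key triples by bucketing the numeric
-- parts per alpha prefix and sorting group names and plain integers separately (gaps only read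
-- the numeric component), and counts the histogram by three passes (objective: faster, constant factor).

-- ===== PORT A =====
-- the 'while index < len(code) and code[index].isalpha()' loop of level_code_sort_key:
-- walks the remaining characters, accumulating 'group'; returns (group, code[index:])
def pvAKeyLoop : List Char → List Char → List Char × List Char
  | [], group => (group, [])
  | c :: rest, group =>
    if PySem.Chars.isalpha c then pvAKeyLoop rest (group ++ [c]) else (group, c :: rest)

def level_code_sort_key (code : String) : String × Int × String :=
  let p := pvAKeyLoop code.toList []
  -- '.getD 0' is unreachable: suffix.isdigit() guarantees int(suffix) parses
  if PySem.Chars.strIsdigit p.2 then (String.ofList p.1, (PySem.Int.ofChars? p.2).getD 0, code)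
  else (String.ofList p.1, 1000000000, code)

-- Python's '<' on the (str, int, str) key tuples is the lexicographic order: sorted(ids, key=…)
-- is PySem.List.sorted with the key mapped into the Lex product order
def pvKeyA (code : String) : Lex (String × Lex (Int × String)) :=
  toLex ((level_code_sort_key code).1,
         toLex ((level_code_sort_key code).2.1, (level_code_sort_key code).2.2))

def summarize_gaps (level_ids_by_word : List (String × List String)) : Int × (List (Int × Int)) :=
  let gaps : List Int := level_ids_by_word.foldl (fun gaps kv =>
    let ordered := PySem.List.sorted kv.2 pvKeyA false
    (PySem.List.pyRange 1 (PySem.List.len ordered) 1).foldl (fun gaps idx =>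
      let prev := level_code_sort_key (PySem.List.pyGetD ordered (idx - 1) "")
      let curr := level_code_sort_key (PySem.List.pyGetD ordered idx "")
      gaps ++ [curr.2.1 - prev.2.1]) gaps) []
  let below0 : PySem.Dict Int Int := ([12, 16, 20] : List Int).foldl (fun d t => d.insert t 0) PySem.Dict.empty
  let below := gaps.foldl (fun d gap =>
    ([12, 16, 20] : List Int).foldl (fun d t => if gap < t then d.modify t 0 (· + 1) else d) d) below0
  ((gaps.length : Int), below.items)

-- ===== PORT B =====
-- the counting 'while i < len(code) and code[i].isalpha(): i += 1' loop of _parse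
def pvBCount : List Char → Nat
  | [] => 0
  | c :: rest => if PySem.Chars.isalpha c then pvBCount rest + 1 else 0

def pvParse (code : String) : String × Int :=
  let cs := code.toList
  let i := pvBCount cs
  let suffix := cs.drop i
  (String.ofList (cs.take i),
   if PySem.Chars.strIsdigit suffix then (PySem.Int.ofChars? suffix).getD 0 else 1000000000)

def summarize_gaps_alt (level_ids_by_word : List (String × List String)) : Int × (List (Int × Int)) :=
  let gaps : List Int := level_ids_by_word.foldl (fun gaps kv =>
    -- buckets: dict group -> list of numeric parts (setdefault(g, []).append(n))
    let d : PySem.Dict String (List Int) := kv.2.foldl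
      (fun d code => d.modify (pvParse code).1 [] (· ++ [(pvParse code).2])) PySem.Dict.empty
    -- nums: sorted group names, each group's numbers sorted, flattened
    let nums : List Int := (PySem.List.sorted d.keys (fun g => g) false).foldl
      (fun nums g => nums ++ PySem.List.sorted (d.getD g []) (fun n => n) false) []
    (nums.zip nums.tail).foldl (fun gaps pr => gaps ++ [pr.2 - pr.1]) gaps) []
  ((gaps.length : Int),
   [(12, gaps.foldl (fun c g => if g < 12 then c + 1 else c) (0 : Int)),
    (16, gaps.foldl (fun c g => if g < 16 then c + 1 else c) (0 : Int)),
    (20, gaps.foldl (fun c g => if g < 20 then c + 1 else c) (0 : Int))])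

-- ===== PRECONDITION & SPEC =====
def Spec_summarize_gaps (level_ids_by_word : List (String × List String)) (out : Int × (List (Int × Int))) : Prop := out = summarize_gaps_alt level_ids_by_word
instance (level_ids_by_word : List (String × List String)) (out : Int × (List (Int × Int))) : Decidable (Spec_summarize_gaps level_ids_by_word out) := by unfold Spec_summarize_gaps; infer_instance

-- ===== CLAIM (what is proved, stated in full; the proofs are below) =====
def Claim_equal_summarize_gaps : Prop := ∀ (level_ids_by_word : List (String × List String)), Dom_summarize_gaps level_ids_by_word → Spec_summarize_gaps level_ids_by_word (summarize_gaps level_ids_by_word)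

-- ===== LEMMAS AND PROOFS =====

-- the two parsing helpers agree
theorem pvAKeyLoop_eq (cs g : List Char) :
    pvAKeyLoop cs g = (g ++ cs.take (pvBCount cs), cs.drop (pvBCount cs)) := by
  induction cs generalizing g with
  | nil => simp [pvAKeyLoop, pvBCount]
  | cons c rest ih =>
    simp only [pvAKeyLoop, pvBCount]
    by_cases h : PySem.Chars.isalpha c = true
    · simp [h, ih]
    · simp [h]

theorem parse_eq (code : String) :
    pvParse code = ((level_code_sort_key code).1, (level_code_sort_key code).2.1) := by
  simp only [pvParse, level_code_sort_key, pvAKeyLoop_eq, List.nil_append]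
  split <;> rfl

-- consecutive differences of a list of numbers
def pvDiffs : List Int → List Int
  | [] => []
  | [_] => []
  | a :: b :: t => (b - a) :: pvDiffs (b :: t)

theorem diffs_append_last (l : List Int) (a b : Int) :
    pvDiffs (l ++ [a, b]) = pvDiffs (l ++ [a]) ++ [b - a] := by
  induction l with
  | nil => rfl
  | cons x l ih =>
    cases l with
    | nil => rfl
    | cons y t => simpa [pvDiffs] using ih

-- A's index loop over range(1, len(ordered)) collects exactly the consecutive diffs of the numbers
theorem rangeFold_eq_diffs (l : List String) (g0 : List Int) :
    (PySem.List.pyRange 1 (PySem.List.len l) 1).foldl (fun gaps idx =>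
      gaps ++ [(level_code_sort_key (PySem.List.pyGetD l idx "")).2.1
               - (level_code_sort_key (PySem.List.pyGetD l (idx - 1) "")).2.1]) g0
    = g0 ++ pvDiffs (l.map (fun s => (level_code_sort_key s).2.1)) := by
  induction l using List.reverseRecOn generalizing g0 with
  | nil => simp [PySem.List.len, PySem.List.pyRange, pvDiffs]
  | append_singleton l a ih =>
    cases l using List.reverseRecOn with
    | nil =>
      simp [PySem.List.len, PySem.List.pyRange, pvDiffs]
    | append_singleton l' b _ =>
      have hlen : PySem.List.len (l' ++ [b] ++ [a]) = (PySem.List.len (l' ++ [b])) + 1 := by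
        simp only [PySem.List.len_eq, List.length_append, List.length_cons, List.length_nil]
        push_cast
        omega
      have hsplit : PySem.List.pyRange 1 (PySem.List.len (l' ++ [b] ++ [a])) 1
          = PySem.List.pyRange 1 (PySem.List.len (l' ++ [b])) 1 ++ [PySem.List.len (l' ++ [b])] := by
        rw [hlen]
        exact PySem.List.pyRange_one_succ_right (by
          simp only [PySem.List.len_eq, List.length_append, List.length_cons, List.length_nil]
          omega)
      rw [hsplit, List.foldl_append]
      have hcongr : (PySem.List.pyRange 1 (PySem.List.len (l' ++ [b])) 1).foldl
          (fun gaps idx =>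
            gaps ++ [(level_code_sort_key (PySem.List.pyGetD (l' ++ [b] ++ [a]) idx "")).2.1
                     - (level_code_sort_key (PySem.List.pyGetD (l' ++ [b] ++ [a]) (idx - 1) "")).2.1]) g0
          = (PySem.List.pyRange 1 (PySem.List.len (l' ++ [b])) 1).foldl
          (fun gaps idx =>
            gaps ++ [(level_code_sort_key (PySem.List.pyGetD (l' ++ [b]) idx "")).2.1
                     - (level_code_sort_key (PySem.List.pyGetD (l' ++ [b]) (idx - 1) "")).2.1]) g0 := by
        apply PySem.List.foldl_congr_mem
        intro acc x hx
        rw [PySem.List.mem_pyRange_one] at hx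
        rw [PySem.List.len_eq] at hx
        have hxlen : x.toNat < (l' ++ [b]).length := by
          simp only [List.length_append, List.length_cons, List.length_nil] at hx ⊢
          omega
        have hx1len : (x - 1).toNat < (l' ++ [b]).length := by
          simp only [List.length_append, List.length_cons, List.length_nil] at hx ⊢
          omega
        have h1 : PySem.List.pyGetD (l' ++ [b] ++ [a]) x "" = PySem.List.pyGetD (l' ++ [b]) x "" := by
          rw [PySem.List.pyGetD_of_nonneg _ _ (by omega), PySem.List.pyGetD_of_nonneg _ _ (by omega),
              List.getD_eq_getElem?_getD, List.getD_eq_getElem?_getD,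
              List.getElem?_append_left hxlen]
        have h2 : PySem.List.pyGetD (l' ++ [b] ++ [a]) (x - 1) "" = PySem.List.pyGetD (l' ++ [b]) (x - 1) "" := by
          rw [PySem.List.pyGetD_of_nonneg _ _ (by omega), PySem.List.pyGetD_of_nonneg _ _ (by omega),
              List.getD_eq_getElem?_getD, List.getD_eq_getElem?_getD,
              List.getElem?_append_left hx1len]
        rw [h1, h2]
      rw [hcongr, ih]
      have hb : PySem.List.pyGetD (l' ++ [b] ++ [a]) (PySem.List.len (l' ++ [b]) - 1) "" = b := by
        rw [PySem.List.len_eq,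
            PySem.List.pyGetD_of_nonneg _ _ (by simp only [List.length_append, List.length_cons, List.length_nil]; omega)]
        have ht : ((((l' ++ [b]).length : Int)) - 1).toNat = l'.length := by
          simp only [List.length_append, List.length_cons, List.length_nil]
          omega
        rw [ht, List.getD_eq_getElem?_getD,
            List.getElem?_append_left (by simp : l'.length < (l' ++ [b]).length),
            List.getElem?_concat_length]
        rfl
      have ha : PySem.List.pyGetD (l' ++ [b] ++ [a]) (PySem.List.len (l' ++ [b])) "" = a := by
        rw [PySem.List.len_eq, PySem.List.pyGetD_natCast, List.getD_eq_getElem?_getD,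
            List.getElem?_concat_length]
        rfl
      simp only [List.foldl_cons, List.foldl_nil]
      rw [hb, ha]
      have hd : pvDiffs ((l' ++ [b] ++ [a]).map (fun s => (level_code_sort_key s).2.1))
          = pvDiffs ((l' ++ [b]).map (fun s => (level_code_sort_key s).2.1))
            ++ [(level_code_sort_key a).2.1 - (level_code_sort_key b).2.1] := by
        have := diffs_append_last (l'.map (fun s => (level_code_sort_key s).2.1))
          ((level_code_sort_key b).2.1) ((level_code_sort_key a).2.1)
        simpa using this
      rw [hd, List.append_assoc]

-- B's zip-with-tail map walks exactly the consecutive diffs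
theorem zip_map_eq_diffs (nums : List Int) :
    (nums.zip nums.tail).map (fun pr => pr.2 - pr.1) = pvDiffs nums := by
  induction nums with
  | nil => rfl
  | cons a t ih =>
    cases t with
    | nil => rfl
    | cons b t' =>
      simp only [List.tail, List.zip, List.zipWith, List.map, pvDiffs] at *
      exact congrArg _ ih

-- the order relation on (group, number) pairs under which both num sequences are sorted
def pvRel (a b : String × Int) : Prop := a.1 < b.1 ∨ (a.1 = b.1 ∧ a.2 ≤ b.2)

theorem pvRel_antisymm (a b : String × Int) (hab : pvRel a b) (hba : pvRel b a) : a = b := by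
  rcases a with ⟨g1, n1⟩; rcases b with ⟨g2, n2⟩
  rcases hab with h | ⟨he, hn⟩ <;> rcases hba with h' | ⟨he', hn'⟩
  · exact absurd h' (lt_asymm h)
  · rw [show g2 = g1 from he'] at h
    exact absurd h (lt_irrefl _)
  · rw [show g1 = g2 from he] at h'
    exact absurd h' (lt_irrefl _)
  · simp_all
    omega

-- the flattened per-group sorted numbers of B, decorated with their group
def pvListB (pairs : List (String × Int)) : List (String × Int) :=
  (PySem.List.sorted (PySem.Set.ofList (pairs.map Prod.fst)) (fun g => g) false).flatMap
    (fun g => (PySem.List.sorted ((pairs.filter (fun p => p.1 == g)).map Prod.snd) (fun n => n) false).map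
      (fun n => (g, n)))

theorem pvListB_pairwise (pairs : List (String × Int)) : (pvListB pairs).Pairwise pvRel := by
  unfold pvListB
  rw [List.flatMap, List.pairwise_flatten]
  constructor
  · intro l' hl'
    rw [List.mem_map] at hl'
    obtain ⟨g, _, rfl⟩ := hl'
    rw [List.pairwise_map]
    exact (PySem.List.sorted_pairwise _ _).imp (fun h => Or.inr ⟨rfl, h⟩)
  · rw [List.pairwise_map]
    refine (PySem.List.sorted_ofList_pairwise_lt _).imp ?_
    intro g1 g2 hlt x hx y hy
    rw [List.mem_map] at hx hy
    obtain ⟨n1, _, rfl⟩ := hx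
    obtain ⟨n2, _, rfl⟩ := hy
    exact Or.inl hlt

-- pointwise permutations lift through flatMap
theorem flatMap_perm_congr {α β : Type} (gs : List α) (f f' : α → List β)
    (h : ∀ g ∈ gs, (f g).Perm (f' g)) : (gs.flatMap f).Perm (gs.flatMap f') := by
  induction gs with
  | nil => simp
  | cons g gs ih =>
    simp only [List.flatMap_cons]
    exact (h g (by simp)).append (ih (fun g' hg' => h g' (by simp [hg'])))

-- partition-by-key: flatMap of the per-key filters over the distinct keys is a permutation
theorem partition_perm (gs : List String) (pairs : List (String × Int))
    (hnd : gs.Nodup) (hcov : ∀ p ∈ pairs, p.1 ∈ gs) :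
    (gs.flatMap (fun g => pairs.filter (fun p => p.1 == g))).Perm pairs := by
  induction gs generalizing pairs with
  | nil =>
    have : pairs = [] := by
      cases pairs with
      | nil => rfl
      | cons p t => exact absurd (hcov p (by simp)) (by simp)
    simp [this]
  | cons g gs ih =>
    rw [List.flatMap_cons]
    have hrest : gs.flatMap (fun g' => pairs.filter (fun p => p.1 == g'))
        = gs.flatMap (fun g' => (pairs.filter (fun p => !(p.1 == g))).filter (fun p => p.1 == g')) := by
      apply List.flatMap_congr
      intro g' hg'
      rw [List.filter_filter]
      apply List.filter_congr
      intro p _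
      have hne : g' ≠ g := fun he => (List.nodup_cons.mp hnd).1 (he ▸ hg')
      by_cases hp : p.1 = g' <;> simp [hp, hne]
    rw [hrest]
    have hperm := ih (pairs.filter (fun p => !(p.1 == g))) (List.nodup_cons.mp hnd).2 (by
      intro p hp
      rw [List.mem_filter] at hp
      have := hcov p hp.1
      simp only [List.mem_cons] at this
      rcases this with h | h
      · exact absurd hp.2 (by simp [h])
      · exact h)
    exact (hperm.append_left _).trans (List.filter_append_perm _ pairs)

theorem pvListB_perm (pairs : List (String × Int)) : (pvListB pairs).Perm pairs := by
  unfold pvListB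
  refine ((List.Perm.flatMap_right _ (PySem.List.sorted_perm _ _ _)).trans ?_)
  refine (flatMap_perm_congr _ _ (fun g => pairs.filter (fun p => p.1 == g)) ?_).trans ?_
  · intro g _
    have h1 : (((pairs.filter (fun p => p.1 == g)).map Prod.snd).map (fun n => (g, n)))
        = pairs.filter (fun p => p.1 == g) := by
      rw [List.map_map]
      have h2 : List.map ((fun n => (g, n)) ∘ Prod.snd) (pairs.filter (fun p => p.1 == g))
          = List.map id (pairs.filter (fun p => p.1 == g)) := by
        apply List.map_congr_left
        intro p hp
        rw [List.mem_filter] at hp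
        have : p.1 = g := by simpa using hp.2
        simp [Function.comp, ← this]
      rw [h2, List.map_id]
    have hp : ((PySem.List.sorted ((pairs.filter (fun p => p.1 == g)).map Prod.snd) (fun n => n) false).map
          (fun n => (g, n))).Perm
        (((pairs.filter (fun p => p.1 == g)).map Prod.snd).map (fun n => (g, n))) :=
      (PySem.List.sorted_perm _ _ _).map _
    rw [h1] at hp
    exact hp
  · apply partition_perm
    · exact PySem.Set.nodup_ofList _
    · intro p hp
      rw [PySem.Set.mem_ofList]
      exact List.mem_map_of_mem hp

-- A's sorted id list, mapped to (group, number) pairs, is pairwise pvRel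
theorem listA_pairwise (ids : List String) :
    ((PySem.List.sorted ids pvKeyA false).map pvParse).Pairwise pvRel := by
  rw [List.pairwise_map]
  refine (PySem.List.sorted_pairwise ids pvKeyA).imp ?_
  intro a b h
  rw [pvKeyA, pvKeyA, Prod.Lex.le_iff] at h
  rw [parse_eq, parse_eq]
  rcases h with h | ⟨he, h2⟩
  · exact Or.inl h
  · right
    refine ⟨he, ?_⟩
    rw [Prod.Lex.le_iff] at h2
    rcases h2 with h2 | ⟨he2, _⟩
    · exact le_of_lt h2
    · exact le_of_eq he2

-- the central fact: A's sorted key projection equals B's grouped construction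
theorem listA_eq_listB (ids : List String) :
    (PySem.List.sorted ids pvKeyA false).map pvParse = pvListB (ids.map pvParse) := by
  refine List.Perm.eq_of_pairwise (le := pvRel)
    (fun a b _ _ hab hba => pvRel_antisymm a b hab hba)
    (listA_pairwise ids) (pvListB_pairwise _) ?_
  exact ((PySem.List.sorted_perm ids pvKeyA false).map pvParse).trans
    (pvListB_perm (ids.map pvParse)).symm

-- B's per-word nums list is the snd-projection of pvListB
theorem numsB_eq (ids : List String) :
    (PySem.List.sorted
        (ids.foldl (fun d code => d.modify (pvParse code).1 [] (· ++ [(pvParse code).2])) PySem.Dict.empty).keys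
        (fun g => g) false).foldl
      (fun nums g => nums ++ PySem.List.sorted
        ((ids.foldl (fun d code => d.modify (pvParse code).1 [] (· ++ [(pvParse code).2])) PySem.Dict.empty).getD g [])
        (fun n => n) false) []
    = (pvListB (ids.map pvParse)).map Prod.snd := by
  have hfold : ids.foldl (fun d code => d.modify (pvParse code).1 [] (· ++ [(pvParse code).2])) PySem.Dict.empty
      = (ids.map pvParse).foldl (fun d p => d.modify p.1 [] (· ++ [p.2])) PySem.Dict.empty := by
    rw [List.foldl_map]
  rw [hfold]
  have hkeys : ((ids.map pvParse).foldl (fun d p => d.modify p.1 [] (· ++ [p.2])) PySem.Dict.empty).keys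
      = PySem.Set.ofList ((ids.map pvParse).map Prod.fst) := by
    rw [PySem.Dict.keys_foldl_modify_key (ids.map pvParse) Prod.fst [] (fun _ p => (· ++ [p.2]))]
    simp only [PySem.Dict.keys_empty, List.map_map]
    exact PySem.Set.update_empty _
  have hbucket : ∀ g, ((ids.map pvParse).foldl (fun d p => d.modify p.1 [] (· ++ [p.2])) PySem.Dict.empty).getD g []
      = ((ids.map pvParse).filter (fun p => p.1 == g)).map Prod.snd := by
    intro g
    rw [PySem.Dict.getD_foldl_modify_append]
    simp [PySem.Dict.getD_empty]
  rw [hkeys, PySem.List.foldl_append_eq_flatMap, List.nil_append]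
  unfold pvListB
  rw [List.map_flatMap]
  apply List.flatMap_congr
  intro g _
  rw [hbucket g, List.map_map]
  simp

-- counting helper: number of gaps strictly below t
def pvCntLt (gs : List Int) (t : Int) : Int := (gs.countP (fun g => decide (g < t)) : Int)

theorem cnt_cons (g : Int) (gs : List Int) (t : Int) :
    pvCntLt (g :: gs) t = pvCntLt gs t + (if g < t then 1 else 0) := by
  simp only [pvCntLt, List.countP_cons]
  split_ifs with h <;> simp_all

theorem A_step (gap x y z : Int) :
    ([12, 16, 20] : List Int).foldl (fun d t => if gap < t then d.modify t 0 (· + 1) else d)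
      (PySem.Dict.mk [(12, x), (16, y), (20, z)])
    = PySem.Dict.mk [(12, x + if gap < 12 then 1 else 0),
                     (16, y + if gap < 16 then 1 else 0),
                     (20, z + if gap < 20 then 1 else 0)] := by
  simp only [List.foldl_cons, List.foldl_nil]
  split_ifs with h1 h2 h3 <;>
    simp [PySem.Dict.modify, PySem.Dict.insert, PySem.Dict.getD, PySem.Dict.get?]

theorem A_hist (gs : List Int) (x y z : Int) :
    (gs.foldl (fun d gap =>
      ([12, 16, 20] : List Int).foldl (fun d t => if gap < t then d.modify t 0 (· + 1) else d) d)
      (PySem.Dict.mk [(12, x), (16, y), (20, z)])).items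
    = [(12, x + pvCntLt gs 12), (16, y + pvCntLt gs 16), (20, z + pvCntLt gs 20)] := by
  induction gs generalizing x y z with
  | nil => simp [pvCntLt]
  | cons g gs ih =>
    rw [List.foldl_cons, A_step, ih]
    simp only [cnt_cons, List.cons.injEq, Prod.mk.injEq]
    exact ⟨⟨trivial, by ring⟩, ⟨trivial, by ring⟩, ⟨trivial, by ring⟩, trivial⟩

-- the shared shape of the per-word gap collection: both sides append the per-word diffs
theorem gaps_eq (lvl : List (String × List String)) :
    lvl.foldl (fun gaps kv =>
      (PySem.List.pyRange 1 (PySem.List.len (PySem.List.sorted kv.2 pvKeyA false)) 1).foldl (fun gaps idx =>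
        gaps ++ [(level_code_sort_key (PySem.List.pyGetD (PySem.List.sorted kv.2 pvKeyA false) idx "")).2.1
                 - (level_code_sort_key (PySem.List.pyGetD (PySem.List.sorted kv.2 pvKeyA false) (idx - 1) "")).2.1]) gaps) []
    = lvl.foldl (fun gaps kv =>
        let d : PySem.Dict String (List Int) := kv.2.foldl
          (fun d code => d.modify (pvParse code).1 [] (· ++ [(pvParse code).2])) PySem.Dict.empty
        let nums : List Int := (PySem.List.sorted d.keys (fun g => g) false).foldl
          (fun nums g => nums ++ PySem.List.sorted (d.getD g []) (fun n => n) false) []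
        (nums.zip nums.tail).foldl (fun gaps pr => gaps ++ [pr.2 - pr.1]) gaps) [] := by
  apply PySem.List.foldl_congr_mem
  intro gaps kv _
  rw [rangeFold_eq_diffs]
  simp only []
  rw [numsB_eq kv.2, PySem.List.foldl_append_singleton_eq_map
    (f := fun pr : Int × Int => pr.2 - pr.1), zip_map_eq_diffs]
  have : (pvListB (kv.2.map pvParse)).map Prod.snd
      = (PySem.List.sorted kv.2 pvKeyA false).map (fun s => (level_code_sort_key s).2.1) := by
    rw [← listA_eq_listB, List.map_map]
    apply List.map_congr_left
    intro s _
    rw [Function.comp, parse_eq]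
  rw [this]

-- ===== VERDICT (by name: the statement is the Claim_ definition above) =====
theorem summarize_gaps_spec : Claim_equal_summarize_gaps := by
  intro lvl _
  unfold Spec_summarize_gaps summarize_gaps summarize_gaps_alt
  simp only []
  rw [gaps_eq]
  set gs := lvl.foldl (fun gaps kv =>
        let d : PySem.Dict String (List Int) := kv.2.foldl
          (fun d code => d.modify (pvParse code).1 [] (· ++ [(pvParse code).2])) PySem.Dict.empty
        let nums : List Int := (PySem.List.sorted d.keys (fun g => g) false).foldl
          (fun nums g => nums ++ PySem.List.sorted (d.getD g []) (fun n => n) false) []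
        (nums.zip nums.tail).foldl (fun gaps pr => gaps ++ [pr.2 - pr.1]) gaps) [] with hgs
  have h0 : (([12, 16, 20] : List Int).foldl (fun d t => d.insert t 0) PySem.Dict.empty : PySem.Dict Int Int)
      = PySem.Dict.mk [(12, 0), (16, 0), (20, 0)] := rfl
  rw [h0, A_hist]
  have hc : ∀ t : Int, gs.foldl (fun c g => if g < t then c + 1 else c) (0 : Int) = pvCntLt gs t := by
    intro t
    rw [PySem.List.foldl_ite_add_one (p := fun g => g < t)]
    simp [pvCntLt]
  rw [← hc 12, ← hc 16, ← hc 20]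
  simp
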